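-- pv_equiv track=rewrite | github.com/LeeHolmes/pycoterm | pycoterm.py | is_position_in_python_string
-- ===== SOURCE A (Python) =====
-- def is_position_in_python_string(text: str, pos: int) -> bool:
--     """Check if position is inside a Python string"""
--     # Count unescaped quotes (both single and double) before this position
--     double_quote_count = 0
--     single_quote_count = 0
--     i = 0
--     while i < pos:
--         if text[i] == '"':
--             # Check if it's escaped
--             escape_count = 0
--             j = i - 1
--             while j >= 0 and text[j] == '\\':
--                 escape_count += 1
--                 j -= 1
--             # If even number of escapes (including 0), quote is not escaped
--             if escape_count % 2 == 0:
--                 double_quote_count += 1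
--         elif text[i] == "'":
--             # Check if it's escaped
--             escape_count = 0
--             j = i - 1
--             while j >= 0 and text[j] == '\\':
--                 escape_count += 1
--                 j -= 1
--             # If even number of escapes (including 0), quote is not escaped
--             if escape_count % 2 == 0:
--                 single_quote_count += 1
--         i += 1
--     # If odd number of quotes, we're inside a string
--     return (double_quote_count % 2 == 1) or (single_quote_count % 2 == 1)
-- ===== SOURCE B (Python) =====
-- def is_position_in_python_string(text: str, pos: int) -> bool:
--     """Check if position is inside a Python string"""
--     # Single forward pass: track whether each quote is escaped via the parity
--     # of the run of consecutive backslashes immediately before it.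
--     dq_open = False
--     sq_open = False
--     bs_even = True  # True iff an even number of backslashes immediately precede i
--     for i in range(pos):
--         ch = text[i]
--         if ch == '"':
--             if bs_even:
--                 dq_open = not dq_open
--             bs_even = True
--         elif ch == "'":
--             if bs_even:
--                 sq_open = not sq_open
--             bs_even = True
--         elif ch == '\\':
--             bs_even = not bs_even
--         else:
--             bs_even = True
--     return dq_open or sq_open
-- ===== Notes on version B (the rewrite author's own statement) =====
-- stated objective: alternative
-- what changed: Replaces A's backward re-scan of the backslash run before every quote (nested loops) by a single forward pass that maintains the parity of the current backslash run and toggles per-quote open flags.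
import Mathlib
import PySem

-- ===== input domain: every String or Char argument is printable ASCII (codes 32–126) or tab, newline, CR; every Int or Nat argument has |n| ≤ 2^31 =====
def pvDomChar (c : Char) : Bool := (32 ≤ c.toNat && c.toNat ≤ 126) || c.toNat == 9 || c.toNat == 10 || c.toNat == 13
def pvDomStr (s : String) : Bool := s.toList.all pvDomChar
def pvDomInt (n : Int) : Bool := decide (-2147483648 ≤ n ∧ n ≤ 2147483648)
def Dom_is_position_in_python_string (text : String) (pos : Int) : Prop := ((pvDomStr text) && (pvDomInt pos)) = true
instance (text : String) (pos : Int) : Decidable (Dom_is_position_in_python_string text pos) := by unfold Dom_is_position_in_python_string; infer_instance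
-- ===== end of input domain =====

-- B replaces A's backward re-scan of backslashes before every quote by a single
-- forward pass that tracks the parity of the current backslash run (different algorithm).


-- ===== PORT A =====
-- inner 'while j >= 0 and text[j] == '\\'' backward scan of A
def pvEscCountA (cs : List Char) (j : Int) : Nat :=
  if h : 0 ≤ j ∧ PySem.List.pyGet? cs j = some '\\' then
    pvEscCountA cs (j - 1) + 1
  else 0
termination_by (j + 1).toNat
decreasing_by all_goals omega

-- outer 'while i < pos' loop of A; pyGet? = none is Python's IndexError (outside Pre_)
def pvLoopA (cs : List Char) (pos i : Int) (dq sq : Nat) : Bool :=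
  if _h : i < pos then
    match PySem.List.pyGet? cs i with
    | none => false
    | some ch =>
      if ch = '"' then
        pvLoopA cs pos (i + 1) (if pvEscCountA cs (i - 1) % 2 = 0 then dq + 1 else dq) sq
      else if ch = '\'' then
        pvLoopA cs pos (i + 1) dq (if pvEscCountA cs (i - 1) % 2 = 0 then sq + 1 else sq)
      else
        pvLoopA cs pos (i + 1) dq sq
  else (dq % 2 == 1) || (sq % 2 == 1)
termination_by (pos - i).toNat
decreasing_by all_goals omega

def is_position_in_python_string (text : String) (pos : Int) : Bool :=
  pvLoopA text.toList pos 0 0 0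

-- ===== PORT B =====
-- B's single forward pass: 'for i in range(pos)' with three flags;
-- pyGet? = none is Python's IndexError (outside Pre_)
def pvLoopB (cs : List Char) (pos i : Int) (dqOpen sqOpen bsEven : Bool) : Bool :=
  if _h : i < pos then
    match PySem.List.pyGet? cs i with
    | none => false
    | some ch =>
      if ch = '"' then
        pvLoopB cs pos (i + 1) (if bsEven then !dqOpen else dqOpen) sqOpen true
      else if ch = '\'' then
        pvLoopB cs pos (i + 1) dqOpen (if bsEven then !sqOpen else sqOpen) true
      else if ch = '\\' then
        pvLoopB cs pos (i + 1) dqOpen sqOpen (!bsEven)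
      else
        pvLoopB cs pos (i + 1) dqOpen sqOpen true
  else dqOpen || sqOpen
termination_by (pos - i).toNat
decreasing_by all_goals omega

def is_position_in_python_string_alt (text : String) (pos : Int) : Bool :=
  pvLoopB text.toList pos 0 false false true

-- ===== PRECONDITION & SPEC =====
-- A indexes text[i] for every 0 <= i < pos, so it raises IndexError iff pos > len(text)
def Pre_is_position_in_python_string (text : String) (pos : Int) : Prop :=
  pos ≤ PySem.Str.len text
instance (text : String) (pos : Int) : Decidable (Pre_is_position_in_python_string text pos) := by
  unfold Pre_is_position_in_python_string; infer_instance
def pvWitness_is_position_in_python_string : String × Int := ("a'b", 2)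

def Spec_is_position_in_python_string (text : String) (pos : Int) (out : Bool) : Prop := out = is_position_in_python_string_alt text pos
instance (text : String) (pos : Int) (out : Bool) : Decidable (Spec_is_position_in_python_string text pos out) := by unfold Spec_is_position_in_python_string; infer_instance

-- ===== CLAIM (what is proved, stated in full; the proofs are below) =====
def Claim_equal_is_position_in_python_string : Prop := ∀ (text : String) (pos : Int), Dom_is_position_in_python_string text pos → Pre_is_position_in_python_string text pos → Spec_is_position_in_python_string text pos (is_position_in_python_string text pos)

-- ===== LEMMAS AND PROOFS =====

-- a character other than backslash ends the escape run
lemma pvEscCountA_eq_zero (cs : List Char) (i : Int)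
    (h : PySem.List.pyGet? cs i ≠ some '\\') : pvEscCountA cs i = 0 := by
  rw [pvEscCountA, dif_neg]
  intro hc
  exact h hc.2

-- a backslash extends the run
lemma pvEscCountA_succ (cs : List Char) (i : Int) (h0 : 0 ≤ i)
    (h : PySem.List.pyGet? cs i = some '\\') :
    pvEscCountA cs i = pvEscCountA cs (i - 1) + 1 := by
  rw [pvEscCountA, dif_pos ⟨h0, h⟩]

lemma pvParitySucc1 (dq : Nat) : ((dq + 1) % 2 == 1) = !(dq % 2 == 1) := by
  rcases Nat.mod_two_eq_zero_or_one dq with h | h <;> simp [Nat.add_mod, h]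

lemma pvParitySucc0 (e : Nat) : ((e + 1) % 2 == 0) = !(e % 2 == 0) := by
  rcases Nat.mod_two_eq_zero_or_one e with h | h <;> simp [Nat.add_mod, h]

-- loop invariant: B's flags are the parities of A's counters, and bsEven is the
-- parity of the backslash run ending just before position i
lemma pvLoop_eq (n : Nat) : ∀ (cs : List Char) (pos i : Int) (dq sq : Nat),
    0 ≤ i → (pos - i).toNat = n →
    pvLoopA cs pos i dq sq =
      pvLoopB cs pos i (dq % 2 == 1) (sq % 2 == 1) (pvEscCountA cs (i - 1) % 2 == 0) := by
  induction n with
  | zero =>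
    intro cs pos i dq sq h0 hn
    unfold pvLoopA pvLoopB
    rw [dif_neg (by omega), dif_neg (by omega)]
  | succ m ih =>
    intro cs pos i dq sq h0 hn
    rw [pvLoopA, pvLoopB, dif_pos (by omega), dif_pos (by omega)]
    cases hg : PySem.List.pyGet? cs i with
    | none => rfl
    | some ch =>
      simp only
      have hi1 : i + 1 - 1 = i := by ring
      by_cases hq : ch = '"'
      · rw [if_pos hq, if_pos hq]
        by_cases he : pvEscCountA cs (i - 1) % 2 = 0
        · rw [if_pos he, ih cs pos (i + 1) (dq + 1) sq (by omega) (by omega), hi1,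
            pvEscCountA_eq_zero cs i (by rw [hg]; simp [hq]), pvParitySucc1]
          simp [he]
        · rw [if_neg he, ih cs pos (i + 1) dq sq (by omega) (by omega), hi1,
            pvEscCountA_eq_zero cs i (by rw [hg]; simp [hq])]
          simp [he]
      · rw [if_neg hq, if_neg hq]
        by_cases hs : ch = '\''
        · rw [if_pos hs, if_pos hs]
          by_cases he : pvEscCountA cs (i - 1) % 2 = 0
          · rw [if_pos he, ih cs pos (i + 1) dq (sq + 1) (by omega) (by omega), hi1,
              pvEscCountA_eq_zero cs i (by rw [hg]; simp [hs]), pvParitySucc1]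
            simp [he]
          · rw [if_neg he, ih cs pos (i + 1) dq sq (by omega) (by omega), hi1,
              pvEscCountA_eq_zero cs i (by rw [hg]; simp [hs])]
            simp [he]
        · rw [if_neg hs, if_neg hs]
          by_cases hb : ch = '\\'
          · rw [if_pos hb, ih cs pos (i + 1) dq sq (by omega) (by omega), hi1,
              pvEscCountA_succ cs i h0 (by rw [hg, hb]), pvParitySucc0]
          · rw [if_neg hb, ih cs pos (i + 1) dq sq (by omega) (by omega), hi1,
              pvEscCountA_eq_zero cs i (by rw [hg]; simp [hb])]
            rfl

-- ===== VERDICT (by name: the statement is the Claim_ definition above) =====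
theorem is_position_in_python_string_spec : Claim_equal_is_position_in_python_string := by
  intro text pos _hdom _hpre
  unfold Spec_is_position_in_python_string is_position_in_python_string is_position_in_python_string_alt
  have hrun : pvEscCountA text.toList (0 - 1) = 0 := by
    rw [pvEscCountA, dif_neg]
    intro hc
    omega
  have h := pvLoop_eq (pos - 0).toNat text.toList pos 0 0 0 (by omega) rfl
  rw [hrun] at h
  simpa using h
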